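-- pv_equiv track=rewrite | github.com/lessen/src | cliffsDelta.py | cdTricky
-- ===== SOURCE A (Python) =====
-- def cdTricky(lst1,lst2):
--   "Trickier. Not novice friendly"
--   def runs(lst):
--     "Reduce runs of repeats to count,item."
--     for j,two in enumerate(lst):
--       if j == 0:
--         one,i = two,0
--       if one!=two:
--         yield j - i,one
--         i = j
--       one = two
--     yield j - i + 1,two
--   m, n = len(lst1), len(lst2)
--   lst2 = sorted(lst2)
--   j = gt = lt = 0
--   for repeats,x in runs(sorted(lst1)):
--     while j <= (n - 1) and lst2[j] <  x:
--       j += 1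
--     gt += j*repeats
--     while j <= (n - 1) and lst2[j] == x:
--       j += 1
--     lt += (n - j)*repeats
--   return lt,gt,m*n
-- ===== SOURCE B (Python) =====
-- def cdTricky(lst1, lst2):
--     gt = lt = 0
--     for x in lst1:
--         for y in lst2:
--             if y < x:
--                 gt += 1
--             elif y > x:
--                 lt += 1
--     return lt, gt, len(lst1) * len(lst2)
-- ===== Notes on version B (the rewrite author's own statement) =====
-- stated objective: simpler
-- what changed: Replaced the sort + run-length-encoding + merge-pointer strategy by the plain all-pairs double loop with two counters; no sorting, no generator. (A raises UnboundLocalError on empty lst1; Pre_ excludes exactly that.)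
import Mathlib
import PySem

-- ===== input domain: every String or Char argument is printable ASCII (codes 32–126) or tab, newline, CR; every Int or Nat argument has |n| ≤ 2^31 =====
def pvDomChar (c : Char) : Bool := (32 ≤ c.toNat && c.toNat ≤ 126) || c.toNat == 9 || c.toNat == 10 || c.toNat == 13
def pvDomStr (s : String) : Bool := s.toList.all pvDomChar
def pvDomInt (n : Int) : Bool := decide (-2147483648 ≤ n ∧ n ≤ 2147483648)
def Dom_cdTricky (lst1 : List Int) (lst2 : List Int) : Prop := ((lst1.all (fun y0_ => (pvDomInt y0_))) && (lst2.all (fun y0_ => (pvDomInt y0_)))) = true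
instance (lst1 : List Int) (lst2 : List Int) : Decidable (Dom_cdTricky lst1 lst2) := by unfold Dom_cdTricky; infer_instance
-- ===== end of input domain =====

-- B replaces A's sort + run-length + merge-pointer scheme by the plain all-pairs
-- double loop with two counters (simpler; not faster).

-- ===== PORT A =====

-- the `runs` generator: state (one, i, j) exactly as in Python; the loop body
-- becomes structural recursion on the remaining list, the final `yield j-i+1,two`
-- is the base case (there `one` is the last element and the last index is j-1).
def runsAux (one : Int) (i : Int) (j : Int) : List Int → List (Int × Int)
  | [] => [(j - i, one)]
  | two :: rest =>
      if one ≠ two then (j - i, one) :: runsAux two j (j + 1) rest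
      else runsAux two i (j + 1) rest

-- runs([]) raises in Python (excluded by Pre_); the [] branch only makes this total.
def runsA : List Int → List (Int × Int)
  | [] => []
  | x :: rest => runsAux x 0 1 rest

-- `while j <= (n-1) and lst2[j] < x: j += 1` (j only ever grows, so Nat; j < length ↔ j <= n-1)
def skipLt (l2 : List Int) (x : Int) (j : Nat) : Nat :=
  if h : j < l2.length then
    if l2.getD j 0 < x then skipLt l2 x (j + 1) else j
  else j
termination_by l2.length - j

-- `while j <= (n-1) and lst2[j] == x: j += 1`
def skipEq (l2 : List Int) (x : Int) (j : Nat) : Nat :=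
  if h : j < l2.length then
    if l2.getD j 0 == x then skipEq l2 x (j + 1) else j
  else j
termination_by l2.length - j

-- the body of A's `for repeats,x in runs(...)` loop, on state (j, gt, lt)
def mergeF (l2 : List Int) (n : Int) : (Nat × Int × Int) → (Int × Int) → (Nat × Int × Int) :=
  fun st p =>
    let j := skipLt l2 p.2 st.1
    let gt := st.2.1 + (j : Int) * p.1
    let j := skipEq l2 p.2 j
    let lt := st.2.2 + (n - (j : Int)) * p.1
    (j, gt, lt)

def cdTricky (lst1 : List Int) (lst2 : List Int) : Int × Int × Int :=
  let m : Int := lst1.length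
  let n : Int := lst2.length
  let l2 := PySem.List.sorted lst2 (fun y => y) false
  let st := (runsA (PySem.List.sorted lst1 (fun y => y) false)).foldl (mergeF l2 n) (0, 0, 0)
  (st.2.2, st.2.1, m * n)

-- ===== PORT B =====

-- the body of B's inner `for y in lst2` loop, on state (gt, lt)
def pairF (x : Int) : (Int × Int) → Int → (Int × Int) :=
  fun q y => if y < x then (q.1 + 1, q.2) else if y > x then (q.1, q.2 + 1) else q

def cdTricky_alt (lst1 : List Int) (lst2 : List Int) : Int × Int × Int :=
  let p := lst1.foldl (fun p x => lst2.foldl (pairF x) p) (0, 0)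
  (p.2, p.1, (lst1.length : Int) * (lst2.length : Int))

-- ===== PRECONDITION & SPEC =====
-- Pre_ excludes only empty lst1, on which A's generator raises UnboundLocalError.
def Pre_cdTricky (lst1 : List Int) (lst2 : List Int) : Prop := lst1 ≠ []
instance (lst1 : List Int) (lst2 : List Int) : Decidable (Pre_cdTricky lst1 lst2) := by unfold Pre_cdTricky; infer_instance
def pvWitness_cdTricky : List Int × List Int := ([3, 1, 1], [2, 1, 4])

def Spec_cdTricky (lst1 : List Int) (lst2 : List Int) (out : Int × Int × Int) : Prop := out = cdTricky_alt lst1 lst2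
instance (lst1 : List Int) (lst2 : List Int) (out : Int × Int × Int) : Decidable (Spec_cdTricky lst1 lst2 out) := by unfold Spec_cdTricky; infer_instance

-- ===== CLAIM (what is proved, stated in full; the proofs are below) =====
def Claim_equal_cdTricky : Prop := ∀ (lst1 : List Int) (lst2 : List Int), Dom_cdTricky lst1 lst2 → Pre_cdTricky lst1 lst2 → Spec_cdTricky lst1 lst2 (cdTricky lst1 lst2)

-- ===== LEMMAS AND PROOFS =====

-- counts of lst2 elements strictly below / at most / strictly above x
def cntLt (l2 : List Int) (x : Int) : Nat := l2.countP (fun y => decide (y < x))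
def cntLe (l2 : List Int) (x : Int) : Nat := l2.countP (fun y => decide (y ≤ x))
def cntGt (l2 : List Int) (x : Int) : Nat := l2.countP (fun y => decide (x < y))

-- position/count characterisation on a sorted list, for a downward-closed predicate
theorem pos_iff (p : Int → Bool) (hm : ∀ y z : Int, y ≤ z → p z = true → p y = true) :
    ∀ (l2 : List Int), l2.Pairwise (· ≤ ·) → ∀ k, k < l2.length →
      (p (l2.getD k 0) = true ↔ k < l2.countP p) := by
  intro l2
  induction l2 with
  | nil => intro _ k hk; simp at hk
  | cons a t ih =>
      intro hp k hk
      have ha : ∀ y ∈ t, a ≤ y := (List.pairwise_cons.mp hp).1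
      have ht := (List.pairwise_cons.mp hp).2
      have hzero : p a ≠ true → t.countP p = 0 := fun hpa =>
        List.countP_eq_zero.mpr (fun y hy hpy => hpa (hm a y (ha y hy) hpy))
      rcases k with _ | k
      · rw [List.getD_cons_zero, List.countP_cons]
        by_cases hpa : p a = true
        · rw [if_pos hpa]; simp [hpa]
        · rw [if_neg hpa, hzero hpa]; simp [hpa]
      · rw [List.getD_cons_succ, List.countP_cons]
        have hk' : k < t.length := by simpa using hk
        have hmem : t.getD k 0 ∈ t := by
          rw [List.getD_eq_getElem t 0 hk']; exact List.getElem_mem hk'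
        by_cases hpa : p a = true
        · rw [if_pos hpa, ih ht k hk']; omega
        · rw [if_neg hpa, hzero hpa]
          constructor
          · intro hpk; exact absurd (hm a _ (ha _ hmem) hpk) hpa
          · intro hlt; omega

theorem cntLt_pos (l2 : List Int) (hs : l2.Pairwise (· ≤ ·)) (x : Int) (k : Nat)
    (hk : k < l2.length) : l2.getD k 0 < x ↔ k < cntLt l2 x := by
  have := pos_iff (fun y => decide (y < x)) (fun y z hyz hz => by
    rw [decide_eq_true_eq] at hz ⊢; omega) l2 hs k hk
  rw [decide_eq_true_eq] at this
  exact this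

theorem cntLe_pos (l2 : List Int) (hs : l2.Pairwise (· ≤ ·)) (x : Int) (k : Nat)
    (hk : k < l2.length) : l2.getD k 0 ≤ x ↔ k < cntLe l2 x := by
  have := pos_iff (fun y => decide (y ≤ x)) (fun y z hyz hz => by
    rw [decide_eq_true_eq] at hz ⊢; omega) l2 hs k hk
  rw [decide_eq_true_eq] at this
  exact this

theorem cntLt_le_length (l2 : List Int) (x : Int) : cntLt l2 x ≤ l2.length :=
  List.countP_le_length

theorem cntLe_le_length (l2 : List Int) (x : Int) : cntLe l2 x ≤ l2.length :=
  List.countP_le_length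

theorem skipLt_eq (l2 : List Int) (x : Int) (hs : l2.Pairwise (· ≤ ·)) :
    ∀ k j, j + k = cntLt l2 x → skipLt l2 x j = cntLt l2 x := by
  intro k
  induction k with
  | zero =>
      intro j hj
      have hj' : j = cntLt l2 x := by omega
      rw [skipLt]
      split_ifs with h1 h2
      · exact absurd ((cntLt_pos l2 hs x j h1).mp h2) (by omega)
      · exact hj'
      · exact hj'
  | succ k ih =>
      intro j hj
      have hlen : j < l2.length := by
        have := cntLt_le_length l2 x; omega
      have hget : l2.getD j 0 < x := (cntLt_pos l2 hs x j hlen).mpr (by omega)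
      rw [skipLt]
      rw [dif_pos hlen, if_pos hget]
      exact ih (j + 1) (by omega)

theorem skipEq_eq (l2 : List Int) (x : Int) (hs : l2.Pairwise (· ≤ ·)) :
    ∀ k j, cntLt l2 x ≤ j → j + k = cntLe l2 x → skipEq l2 x j = cntLe l2 x := by
  intro k
  induction k with
  | zero =>
      intro j h1 hj
      have hj' : j = cntLe l2 x := by omega
      rw [skipEq]
      split_ifs with hl he
      · have heq : l2.getD j 0 = x := by simpa using he
        exact absurd ((cntLe_pos l2 hs x j hl).mp (le_of_eq heq)) (by omega)
      · exact hj'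
      · exact hj'
  | succ k ih =>
      intro j h1 hj
      have hlen : j < l2.length := by
        have := cntLe_le_length l2 x; omega
      have hle : l2.getD j 0 ≤ x := (cntLe_pos l2 hs x j hlen).mpr (by omega)
      have hnlt : ¬ (l2.getD j 0 < x) := fun hlt =>
        absurd ((cntLt_pos l2 hs x j hlen).mp hlt) (by omega)
      have heq : (l2.getD j 0 == x) = true := by
        rw [beq_iff_eq]; omega
      rw [skipEq]
      rw [dif_pos hlen, if_pos heq]
      exact ih (j + 1) (by omega) (by omega)

theorem cntLt_le_cntLe (l2 : List Int) (x : Int) : cntLt l2 x ≤ cntLe l2 x :=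
  List.countP_mono_left (fun y _ h => by rw [decide_eq_true_eq] at h ⊢; omega)

theorem cntLe_le_cntLt (l2 : List Int) {x x' : Int} (h : x < x') : cntLe l2 x ≤ cntLt l2 x' :=
  List.countP_mono_left (fun y _ hy => by rw [decide_eq_true_eq] at hy ⊢; omega)

theorem cntLe_add_cntGt (l2 : List Int) (x : Int) : cntLe l2 x + cntGt l2 x = l2.length := by
  unfold cntLe cntGt
  induction l2 with
  | nil => rfl
  | cons a t ih =>
      rw [List.countP_cons, List.countP_cons, List.length_cons]
      by_cases h : a ≤ x
      · rw [if_pos (by rw [decide_eq_true_eq]; exact h),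
            if_neg (by rw [decide_eq_true_eq]; omega)]
        omega
      · rw [if_neg (by rw [decide_eq_true_eq]; exact h),
            if_pos (by rw [decide_eq_true_eq]; omega)]
        omega

theorem mergeFold (l2 : List Int) (hs : l2.Pairwise (· ≤ ·)) :
    ∀ (rs : List (Int × Int)) (j : Nat) (gt lt : Int),
      List.IsChain (fun p q : Int × Int => p.2 < q.2) rs →
      (∀ hd ∈ rs.head?, j ≤ cntLt l2 hd.2) →
      (rs.foldl (mergeF l2 (l2.length : Int)) (j, gt, lt)).2 =
        (gt + (rs.map (fun p => p.1 * (cntLt l2 p.2 : Int))).sum,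
         lt + (rs.map (fun p => p.1 * (cntGt l2 p.2 : Int))).sum) := by
  intro rs
  induction rs with
  | nil => intro j gt lt _ _; simp
  | cons p rs ih =>
      intro j gt lt hchain hhead
      have hj : j ≤ cntLt l2 p.2 := hhead p (by simp)
      have h1 : skipLt l2 p.2 j = cntLt l2 p.2 :=
        skipLt_eq l2 p.2 hs (cntLt l2 p.2 - j) j (by omega)
      have h2 : skipEq l2 p.2 (cntLt l2 p.2) = cntLe l2 p.2 :=
        skipEq_eq l2 p.2 hs (cntLe l2 p.2 - cntLt l2 p.2) (cntLt l2 p.2) le_rfl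
          (by have := cntLt_le_cntLe l2 p.2; omega)
      have hng : ((l2.length : Int) - (cntLe l2 p.2 : Int)) = (cntGt l2 p.2 : Int) := by
        have := cntLe_add_cntGt l2 p.2
        omega
      have hch' : List.IsChain (fun p q : Int × Int => p.2 < q.2) rs := by
        cases rs with
        | nil => exact List.IsChain.nil
        | cons q rs' => exact (List.isChain_cons_cons.mp hchain).2
      have hhd' : ∀ hd ∈ rs.head?, cntLe l2 p.2 ≤ cntLt l2 hd.2 := by
        intro hd hhd
        cases rs with
        | nil => simp at hhd
        | cons q rs' =>
            simp only [List.head?_cons, Option.mem_def, Option.some.injEq] at hhd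
            subst hhd
            exact cntLe_le_cntLt l2 (List.isChain_cons_cons.mp hchain).1
      have hrs := ih (cntLe l2 p.2) (gt + (cntLt l2 p.2 : Int) * p.1)
        (lt + ((l2.length : Int) - (cntLe l2 p.2 : Int)) * p.1) hch' hhd'
      rw [List.foldl_cons]
      have hstep : mergeF l2 (l2.length : Int) (j, gt, lt) p =
          (cntLe l2 p.2, gt + (cntLt l2 p.2 : Int) * p.1,
           lt + ((l2.length : Int) - (cntLe l2 p.2 : Int)) * p.1) := by
        simp only [mergeF, h1, h2]
      rw [hstep, hrs]
      simp only [List.map_cons, List.sum_cons, hng, Prod.mk.injEq]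
      constructor <;> ring

theorem runsAux_sum (f : Int → Int) :
    ∀ (rest : List Int) (one : Int) (i j : Int),
      ((runsAux one i j rest).map (fun p => p.1 * f p.2)).sum =
        (j - i) * f one + (rest.map f).sum := by
  intro rest
  induction rest with
  | nil => intro one i j; simp [runsAux]
  | cons two rest ih =>
      intro one i j
      by_cases h : one = two
      · subst h
        simp only [runsAux, ne_eq, not_true_eq_false, if_false, ih, List.map_cons, List.sum_cons]
        ring
      · simp only [runsAux, ne_eq, h, not_false_eq_true, if_true, List.map_cons, List.sum_cons, ih,
          List.map, List.sum_cons]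
        ring

theorem runsAux_head :
    ∀ (rest : List Int) (one : Int) (i j : Int),
      (runsAux one i j rest).head?.map Prod.snd = some one := by
  intro rest
  induction rest with
  | nil => intro one i j; simp [runsAux]
  | cons two rest ih =>
      intro one i j
      by_cases h : one = two
      · subst h
        simp only [runsAux, ne_eq, not_true_eq_false, if_false]
        exact ih one i (j + 1)
      · simp [runsAux, h]

theorem runsAux_chain :
    ∀ (rest : List Int) (one : Int) (i j : Int),
      List.IsChain (· ≤ ·) (one :: rest) →
      List.IsChain (fun p q : Int × Int => p.2 < q.2) (runsAux one i j rest) := by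
  intro rest
  induction rest with
  | nil => intro one i j _; simp [runsAux]
  | cons two rest ih =>
      intro one i j hc
      have h12 : one ≤ two := (List.isChain_cons_cons.mp hc).1
      have hc' : List.IsChain (· ≤ ·) (two :: rest) := (List.isChain_cons_cons.mp hc).2
      by_cases h : one = two
      · subst h
        simp only [runsAux, ne_eq, not_true_eq_false, if_false]
        exact ih one i (j + 1) hc'
      · simp only [runsAux, ne_eq, h, not_false_eq_true, if_true]
        have htail := ih two j (j + 1) hc'
        have hhead := runsAux_head rest two j (j + 1)
        cases hr : runsAux two j (j + 1) rest with
        | nil => simp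
        | cons q t =>
            rw [hr] at htail hhead
            simp only [List.head?_cons, Option.map_some, Option.some.injEq] at hhead
            exact List.isChain_cons_cons.mpr ⟨by rw [hhead]; omega, htail⟩

theorem pairFold (x : Int) :
    ∀ (l2 : List Int) (q : Int × Int),
      l2.foldl (pairF x) q = (q.1 + (cntLt l2 x : Int), q.2 + (cntGt l2 x : Int)) := by
  intro l2
  induction l2 with
  | nil => intro q; simp [cntLt, cntGt]
  | cons y t ih =>
      intro q
      rw [List.foldl_cons, ih]
      unfold pairF cntLt cntGt
      rw [List.countP_cons, List.countP_cons]
      rcases lt_trichotomy y x with h | h | h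
      · rw [if_pos h, if_pos (by rw [decide_eq_true_eq]; exact h),
            if_neg (by rw [decide_eq_true_eq]; omega)]
        simp only [Prod.mk.injEq]
        constructor <;> (push_cast; ring)
      · rw [if_neg (by omega : ¬ y < x), if_neg (by omega : ¬ y > x),
            if_neg (by rw [decide_eq_true_eq]; omega),
            if_neg (by rw [decide_eq_true_eq]; omega)]
        simp
      · rw [if_neg (by omega : ¬ y < x), if_pos (by omega : y > x),
            if_neg (by rw [decide_eq_true_eq]; omega),
            if_pos (by rw [decide_eq_true_eq]; omega)]
        simp only [Prod.mk.injEq]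
        constructor <;> (push_cast; ring)

theorem altFold (lst2 : List Int) :
    ∀ (l1 : List Int) (p : Int × Int),
      l1.foldl (fun p x => lst2.foldl (pairF x) p) p =
        (p.1 + (l1.map (fun x => ((cntLt lst2 x : Int)))).sum,
         p.2 + (l1.map (fun x => ((cntGt lst2 x : Int)))).sum) := by
  intro l1
  induction l1 with
  | nil => intro p; simp
  | cons x t ih =>
      intro p
      rw [List.foldl_cons, pairFold x lst2 p, ih]
      simp only [List.map_cons, List.sum_cons, Prod.mk.injEq]
      constructor <;> ring

-- ===== VERDICT (by name: the statement is the Claim_ definition above) =====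
theorem cdTricky_spec : Claim_equal_cdTricky := by
  intro lst1 lst2 _ hpre
  unfold Spec_cdTricky cdTricky cdTricky_alt
  set l2 := PySem.List.sorted lst2 (fun y => y) false with hl2
  have hlen2 : l2.length = lst2.length := PySem.List.length_sorted lst2 (fun y => y) false
  have hperm2 : l2.Perm lst2 := PySem.List.sorted_perm lst2 (fun y => y) false
  have hs2 : l2.Pairwise (· ≤ ·) := PySem.List.sorted_pairwise lst2 (fun y => y)
  set L1 := PySem.List.sorted lst1 (fun y => y) false with hL1
  have hperm1 : L1.Perm lst1 := PySem.List.sorted_perm lst1 (fun y => y) false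
  have hs1 : L1.Pairwise (· ≤ ·) := PySem.List.sorted_pairwise lst1 (fun y => y)
  have hL1ne : L1 ≠ [] := by
    intro h
    exact hpre ((PySem.List.sorted_eq_nil_iff lst1 (fun y => y) false).mp h)
  -- agreement of the two sum formulations for any f
  have hsum : ∀ f : Int → Int,
      ((runsA L1).map (fun p => p.1 * f p.2)).sum = (lst1.map f).sum := by
    intro f
    cases hL : L1 with
    | nil => exact absurd hL hL1ne
    | cons x rest =>
        show ((runsAux x 0 1 rest).map (fun p => p.1 * f p.2)).sum = _
        rw [runsAux_sum f rest x 0 1]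
        have : ((x :: rest).map f).sum = (lst1.map f).sum :=
          List.Perm.sum_eq (List.Perm.map f (hL ▸ hperm1))
        simp only [List.map_cons, List.sum_cons] at this
        omega
  have hchain : List.IsChain (fun p q : Int × Int => p.2 < q.2) (runsA L1) := by
    cases hL : L1 with
    | nil => exact absurd hL hL1ne
    | cons x rest =>
        exact runsAux_chain rest x 0 1 (List.isChain_iff_pairwise.mpr (hL ▸ hs1))
  have hhead : ∀ hd ∈ (runsA L1).head?, (0 : Nat) ≤ cntLt l2 hd.2 := fun _ _ => Nat.zero_le _
  have hmf := mergeFold l2 hs2 (runsA L1) 0 0 0 hchain hhead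
  have hcLt : ∀ x, cntLt l2 x = cntLt lst2 x := fun x => List.Perm.countP_eq _ hperm2
  have hcGt : ∀ x, cntGt l2 x = cntGt lst2 x := fun x => List.Perm.countP_eq _ hperm2
  have haf := altFold lst2 lst1 (0, 0)
  simp only [← hlen2] at *
  rw [haf, hmf]
  simp only [Prod.mk.injEq]
  refine ⟨?_, ?_, trivial⟩
  · have := hsum (fun x => (cntGt l2 x : Int))
    simp only [hcGt] at this ⊢
    omega
  · have := hsum (fun x => (cntLt l2 x : Int))
    simp only [hcLt] at this ⊢
    omega
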